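-- pv_equiv track=rewrite | github.com/Axel-Mart28/Algoritmos_IA | 002_Probabilidad_Incertidumbre/002_Razonamiento_Probabilistico/003_Manto_De_Markov.py | encontrar_manto_markov
-- ===== SOURCE A (Python) =====
-- def encontrar_manto_markov(red, nodo_X):
--     """
--     Encuentra y devuelve el conjunto de nodos que
--     forman el Manto de Markov de 'nodo_X'.
--     """
--
--     # 1. Crear el conjunto (set) para guardar los nodos del manto
--     #    (Usamos un 'set' para evitar duplicados automáticamente)
--     manto = set()
--
--     # --- Paso 1: Añadir los PADRES de X ---
--     # Obtener el diccionario del nodo (ej. red['Alarma'])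
--     nodo_info = red[nodo_X]
--     # .update() añade todos los ítems de la lista al 'set'
--     manto.update(nodo_info['parents']) # Ej: añade 'Robo', 'Terremoto'
--
--     # --- Paso 2: Añadir los HIJOS de X ---
--     hijos = set() # Un 'set' temporal para guardar los hijos
--
--     # Para encontrar a los hijos, debemos recorrer *toda* la red
--     for nombre_nodo_v, info_v in red.items():
--         # Si 'nodo_X' está en la lista de padres de 'v'...
--         if nodo_X in info_v['parents']:
--             # ...entonces 'v' es un hijo de 'X'.
--             hijos.add(nombre_nodo_v) # Ej: añade 'JuanLlama', 'MariaLlama'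
--
--     manto.update(hijos) # Añadir los hijos al manto principal
--
--     # --- Paso 3: Añadir los CO-PADRES de X ---
--     # (Los otros padres de los hijos de X)
--
--     for hijo in hijos: # Iterar sobre los hijos que acabamos de encontrar
--         # Obtener la información del nodo hijo
--         info_hijo = red[hijo]
--         # Obtener *sus* padres
--         padres_del_hijo = info_hijo['parents'] # Ej: ['Alarma']
--
--         # Añadir todos esos padres al manto
--         manto.update(padres_del_hijo)
--
--     # --- Limpieza Final ---
--     # El manto puede incluir accidentalmente al 'nodo_X' mismo
--     # (si un hijo tiene a 'X' como padre, lo cual es seguro).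
--     # El manto *no* se incluye a sí mismo.
--     if nodo_X in manto:
--         manto.remove(nodo_X)
--
--     return manto # Devuelve el conjunto final
-- ===== SOURCE B (Python) =====
-- def encontrar_manto_markov(red, nodo_X):
--     # Different data structure: invert the network once into an index
--     # parent -> [children], independent of nodo_X; then the blanket is read
--     # off by direct index/dict lookups with no per-node membership scan.
--     hijos_de = {}
--     for nombre, info in red.items():
--         for p in dict.fromkeys(info["parents"]):
--             hijos_de.setdefault(p, []).append(nombre)
--     padres = red[nodo_X]['parents']
--     hijos = hijos_de.get(nodo_X, [])
--     copadres = [q for h in hijos for q in red[h]['parents']]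
--     return {n for n in padres + hijos + copadres if n != nodo_X}
-- ===== Notes on version B (the rewrite author's own statement) =====
-- stated objective: alternative
-- what changed: Instead of A's X-specific children scan (membership test of nodo_X in every node's parent list) plus a second loop re-looking children up, B first builds an inverted index parent->children of the whole network, independent of nodo_X, and then reads the blanket off by dict lookups (index[X] gives the children, red[h] their parents), building the set once with a comprehension that skips nodo_X.
import Mathlib
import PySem

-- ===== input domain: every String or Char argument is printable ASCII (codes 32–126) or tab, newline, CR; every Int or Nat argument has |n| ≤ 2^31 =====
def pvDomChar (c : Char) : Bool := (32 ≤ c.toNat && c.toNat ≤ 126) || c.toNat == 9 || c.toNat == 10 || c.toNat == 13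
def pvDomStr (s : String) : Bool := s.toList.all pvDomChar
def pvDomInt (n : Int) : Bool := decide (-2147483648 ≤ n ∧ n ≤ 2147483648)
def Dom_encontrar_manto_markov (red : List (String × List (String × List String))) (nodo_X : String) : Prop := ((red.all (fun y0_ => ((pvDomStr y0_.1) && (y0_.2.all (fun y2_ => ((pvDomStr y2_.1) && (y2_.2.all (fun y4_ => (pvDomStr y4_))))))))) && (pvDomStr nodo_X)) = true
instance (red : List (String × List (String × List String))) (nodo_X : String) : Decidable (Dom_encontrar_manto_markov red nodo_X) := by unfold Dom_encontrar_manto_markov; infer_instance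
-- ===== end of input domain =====

-- B replaces A's X-specific children scan and re-lookup loop by an inverted parent->children
-- index built once over the whole network, the blanket then read off by direct lookups.

-- ===== PORT A =====
def encontrar_manto_markov (red : List (String × List (String × List String))) (nodo_X : String) : List String :=
  -- nodo_info = red[nodo_X]  (KeyError when absent — excluded by Pre_)
  let nodo_info := (PySem.Dict.mk red).getD nodo_X []
  -- manto = set(); manto.update(nodo_info['parents'])
  let manto := PySem.Set.update (PySem.Set.empty) ((PySem.Dict.mk nodo_info).getD "parents" [])
  -- hijos = set(); for nombre_nodo_v, info_v in red.items(): if nodo_X in info_v['parents']: hijos.add(v)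
  let hijos := red.foldl (fun (h : PySem.Set String) p =>
      if ((PySem.Dict.mk p.2).getD "parents" []).contains nodo_X then PySem.Set.add h p.1 else h)
    PySem.Set.empty
  -- manto.update(hijos)
  let manto := PySem.Set.update manto hijos
  -- for hijo in hijos: manto.update(red[hijo]['parents'])   (set iteration: result is a set, order-safe)
  let manto := hijos.foldl (fun m hijo =>
      PySem.Set.update m ((PySem.Dict.mk ((PySem.Dict.mk red).getD hijo [])).getD "parents" [])) manto
  -- if nodo_X in manto: manto.remove(nodo_X)
  if manto.contains nodo_X then PySem.Set.discard manto nodo_X else manto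

-- ===== PORT B =====
def encontrar_manto_markov_alt (red : List (String × List (String × List String))) (nodo_X : String) : List String :=
  -- hijos_de = {}; for nombre, info in red.items(): for p in dict.fromkeys(info['parents']): hijos_de.setdefault(p, []).append(nombre)
  let hijos_de := red.foldl (fun (d : PySem.Dict String (List String)) p =>
      (PySem.Set.ofList ((PySem.Dict.mk p.2).getD "parents" [])).foldl
        (fun d q => d.modify q [] (· ++ [p.1])) d) PySem.Dict.empty
  -- padres = red[nodo_X]['parents']
  let padres := (PySem.Dict.mk ((PySem.Dict.mk red).getD nodo_X [])).getD "parents" []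
  -- hijos = hijos_de.get(nodo_X, [])
  let hijos := hijos_de.getD nodo_X []
  -- copadres = [q for h in hijos for q in red[h]['parents']]
  let copadres := hijos.flatMap (fun h => (PySem.Dict.mk ((PySem.Dict.mk red).getD h [])).getD "parents" [])
  -- {n for n in padres + hijos + copadres if n != nodo_X}
  PySem.Set.ofList ((padres ++ hijos ++ copadres).filter (fun n => n != nodo_X))

-- ===== PRECONDITION & SPEC =====
-- Pre_ excludes the inputs where Python raises KeyError (nodo_X not a key of red, or some
-- node's info dict lacking 'parents'); it also restricts to distinct keys, which every real
-- Python dict input satisfies (an association list with duplicate keys represents no dict).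
def Pre_encontrar_manto_markov (red : List (String × List (String × List String))) (nodo_X : String) : Prop :=
  (red.map Prod.fst).Nodup ∧ nodo_X ∈ red.map Prod.fst ∧ ∀ p ∈ red, "parents" ∈ p.2.map Prod.fst
instance (red : List (String × List (String × List String))) (nodo_X : String) : Decidable (Pre_encontrar_manto_markov red nodo_X) := by unfold Pre_encontrar_manto_markov; infer_instance

def pvWitness_encontrar_manto_markov : (List (String × List (String × List String))) × String :=
  ([("a", [("parents", ["b"])]), ("b", [("parents", [])])], "b")

def Spec_encontrar_manto_markov (red : List (String × List (String × List String))) (nodo_X : String) (out : List String) : Prop := out = encontrar_manto_markov_alt red nodo_X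
instance (red : List (String × List (String × List String))) (nodo_X : String) (out : List String) : Decidable (Spec_encontrar_manto_markov red nodo_X out) := by unfold Spec_encontrar_manto_markov; infer_instance

-- ===== CLAIM (what is proved, stated in full; the proofs are below) =====
def Claim_equal_encontrar_manto_markov : Prop := ∀ (red : List (String × List (String × List String))) (nodo_X : String), Dom_encontrar_manto_markov red nodo_X → Pre_encontrar_manto_markov red nodo_X → Spec_encontrar_manto_markov red nodo_X (encontrar_manto_markov red nodo_X)

-- ===== LEMMAS AND PROOFS =====

theorem pv_filter_foldl_add {α : Type} [BEq α] [LawfulBEq α] (q : α → Bool) :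
    ∀ (L s : List α), (L.foldl PySem.Set.add s).filter q = (L.filter q).foldl PySem.Set.add (s.filter q) := by
  intro L
  induction L with
  | nil => intro s; simp
  | cons hd tl ih =>
    intro s
    have hstep : (PySem.Set.add s hd).filter q =
        if q hd then PySem.Set.add (s.filter q) hd else s.filter q := by
      by_cases hc : hd ∈ s
      · have : PySem.Set.add s hd = s := by
          simp [PySem.Set.add, PySem.Set.contains, hc]
        rw [this]
        by_cases hq : q hd = true
        · have : hd ∈ s.filter q := List.mem_filter.mpr ⟨hc, hq⟩
          simp [hq, PySem.Set.add, PySem.Set.contains, this]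
        · simp [hq]
      · have : PySem.Set.add s hd = s ++ [hd] := by
          simp [PySem.Set.add, PySem.Set.contains, hc]
        rw [this]
        by_cases hq : q hd = true
        · have : hd ∉ s.filter q := fun h => hc (List.mem_filter.mp h).1
          simp [hq, PySem.Set.add, PySem.Set.contains, this, List.filter_append]
        · simp [hq, List.filter_append]
    simp only [List.foldl_cons, ih, hstep]
    by_cases hq : q hd = true <;> simp [hq]

-- A's children loop over the network appends the keys of the matching entries (keys distinct)
theorem pv_children_fold (c : (String × List (String × List String)) → Bool) :
    ∀ (red : List (String × List (String × List String))) (s : List String),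
      (∀ p ∈ red, p.1 ∉ s) → (red.map Prod.fst).Nodup →
      red.foldl (fun h p => if c p then PySem.Set.add h p.1 else h) s
        = s ++ (red.filter c).map Prod.fst := by
  intro red
  induction red with
  | nil => intro s _ _; simp
  | cons hd tl ih =>
    intro s hs hnd
    have hnd' : (tl.map Prod.fst).Nodup := (List.nodup_cons.mp (by simpa using hnd)).2
    have hhd : hd.1 ∉ tl.map Prod.fst := (List.nodup_cons.mp (by simpa using hnd)).1
    by_cases hc : c hd = true
    · have hadd : PySem.Set.add s hd.1 = s ++ [hd.1] := by
        have : hd.1 ∉ s := hs hd (by simp)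
        simp [PySem.Set.add, PySem.Set.contains, this]
      have hrec := ih (s ++ [hd.1])
        (by
          intro p hp
          simp only [List.mem_append, List.mem_singleton]
          rintro (h | h)
          · exact hs p (by simp [hp]) h
          · exact hhd (h ▸ List.mem_map_of_mem hp))
        hnd'
      simp [hc, hadd, hrec]
    · have hrec := ih s (fun p hp => hs p (by simp [hp])) hnd'
      simp [hc, hrec]

-- iterated Set.update is one Set.update with the concatenation
theorem pv_foldl_update {α β : Type} [BEq β] (f : α → List β) :
    ∀ (l : List α) (s : PySem.Set β),
      l.foldl (fun m x => PySem.Set.update m (f x)) s = PySem.Set.update s (l.flatMap f) := by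
  intro l
  induction l with
  | nil => intro s; simp [PySem.Set.update]
  | cons hd tl ih =>
    intro s
    rw [List.foldl_cons, ih, List.flatMap_cons]
    simp [PySem.Set.update, List.foldl_append]

theorem pv_getD_mk_of_mem {ν : Type} (red : List (String × ν)) (p : String × ν) (d0 : ν)
    (hp : p ∈ red) (hnd : (red.map Prod.fst).Nodup) :
    (PySem.Dict.mk red).getD p.1 d0 = p.2 := by
  exact PySem.Dict.getD_of_mem_items (PySem.Dict.mk red) (by simpa using hp)
    (by simpa [PySem.Dict.keys_mk] using hnd) d0

theorem pv_update_update {α : Type} [BEq α] (a b c : List α) :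
    (((PySem.Set.empty : PySem.Set α).update a).update b).update c
      = List.foldl PySem.Set.add [] (a ++ b ++ c) := by
  simp [PySem.Set.update, PySem.Set.empty, List.foldl_append]

theorem pv_cleanup (L : List String) (x : String) :
    (if (List.foldl PySem.Set.add ([] : List String) L).contains x = true
      then (List.foldl PySem.Set.add ([] : List String) L).discard x
      else List.foldl PySem.Set.add ([] : List String) L)
      = PySem.Set.ofList (L.filter (fun n => n != x)) := by
  have hfo : PySem.Set.ofList (L.filter (fun n => n != x))
      = (List.foldl PySem.Set.add ([] : List String) L).filter (fun n => n != x) := by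
    simpa [PySem.Set.ofList, PySem.Set.empty] using (pv_filter_foldl_add (fun n => n != x) L []).symm
  rw [hfo]
  by_cases hc : (List.foldl PySem.Set.add ([] : List String) L).contains x = true
  · rw [if_pos hc]
    simp [PySem.Set.discard, bne]
  · rw [if_neg hc]
    have hmem : ∀ y ∈ List.foldl PySem.Set.add ([] : List String) L, (y != x) = true := by
      intro y hy
      have : x ∉ List.foldl PySem.Set.add ([] : List String) L := by
        simpa [PySem.Set.contains] using hc
      simp only [bne_iff_ne, ne_eq]
      exact fun h => this (h ▸ hy)
    exact (List.filter_eq_self.mpr hmem).symm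

-- a run of modifies at keys other than k leaves the entry at k unchanged
theorem pv_inner_skip (x k : String) :
    ∀ (S : List String) (d : PySem.Dict String (List String)), k ∉ S →
      (S.foldl (fun d q => d.modify q [] (· ++ [x])) d).getD k [] = d.getD k [] := by
  intro S
  induction S with
  | nil => intro d _; rfl
  | cons hd tl ih =>
    intro d hk
    rw [List.foldl_cons, ih _ (fun h => hk (List.mem_cons_of_mem _ h)),
        PySem.Dict.getD_modify_of_ne _ _ _ (fun h => hk (by rw [h]; exact List.mem_cons_self))]

-- one node's inner loop appends x to the entry at k exactly when k is among its (distinct) parents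
theorem pv_inner_fold (x k : String) :
    ∀ (S : List String) (d : PySem.Dict String (List String)), S.Nodup →
      (S.foldl (fun d q => d.modify q [] (· ++ [x])) d).getD k []
        = d.getD k [] ++ (if k ∈ S then [x] else []) := by
  intro S
  induction S with
  | nil => intro d _; simp
  | cons hd tl ih =>
    intro d hnd
    obtain ⟨hhd, hnd'⟩ := List.nodup_cons.mp hnd
    rw [List.foldl_cons]
    by_cases hk : k = hd
    · subst hk
      rw [pv_inner_skip x k tl _ hhd, PySem.Dict.getD_modify_self]
      simp
    · rw [ih _ hnd', PySem.Dict.getD_modify_of_ne _ _ _ hk]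
      simp [hk]

-- the inverted index: the entry at k collects, in network order, the nodes having k as parent
theorem pv_index_fold (k : String) :
    ∀ (red : List (String × List (String × List String))) (d : PySem.Dict String (List String)),
      (red.foldl (fun (d : PySem.Dict String (List String)) p =>
          (PySem.Set.ofList ((PySem.Dict.mk p.2).getD "parents" [])).foldl
            (fun d q => d.modify q [] (· ++ [p.1])) d) d).getD k []
        = d.getD k []
          ++ (red.filter (fun p => ((PySem.Dict.mk p.2).getD "parents" []).contains k)).map Prod.fst := by
  intro red
  induction red with
  | nil => intro d; simp
  | cons hd tl ih =>
    intro d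
    rw [List.foldl_cons, ih,
        pv_inner_fold hd.1 k _ _ (PySem.Set.nodup_ofList _)]
    by_cases hc : k ∈ (PySem.Dict.mk hd.2).getD "parents" []
    · have hm : k ∈ PySem.Set.ofList ((PySem.Dict.mk hd.2).getD "parents" []) :=
        (PySem.Set.mem_ofList _ _).mpr hc
      simp [hc, hm]
    · have hm : k ∉ PySem.Set.ofList ((PySem.Dict.mk hd.2).getD "parents" []) :=
        fun h => hc ((PySem.Set.mem_ofList _ _).mp h)
      simp [hc, hm]

-- ===== VERDICT (by name: the statement is the Claim_ definition above) =====
theorem pv_main (red : List (String × List (String × List String))) (nodo_X : String)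
    (hnd : (red.map Prod.fst).Nodup) :
    encontrar_manto_markov red nodo_X = encontrar_manto_markov_alt red nodo_X := by
  classical
  simp only [encontrar_manto_markov, encontrar_manto_markov_alt]
  have hh : List.foldl (fun (h : PySem.Set String) p =>
        if ((PySem.Dict.mk p.2).getD "parents" []).contains nodo_X = true then PySem.Set.add h p.1 else h)
        PySem.Set.empty red
      = (red.filter (fun p => ((PySem.Dict.mk p.2).getD "parents" []).contains nodo_X)).map Prod.fst := by
    simpa using pv_children_fold (fun p => ((PySem.Dict.mk p.2).getD "parents" []).contains nodo_X) red []
      (by intro p _ h; simp at h) hnd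
  have hidx := pv_index_fold nodo_X red PySem.Dict.empty
  have hempty : (PySem.Dict.empty : PySem.Dict String (List String)).getD nodo_X [] = [] := rfl
  rw [hempty, List.nil_append] at hidx
  rw [hh, hidx, pv_foldl_update (fun hijo =>
      (PySem.Dict.mk ((PySem.Dict.mk red).getD hijo [])).getD "parents" [])]
  have hflat : List.flatMap (fun hijo => (PySem.Dict.mk ((PySem.Dict.mk red).getD hijo [])).getD "parents" [])
        ((red.filter (fun p => ((PySem.Dict.mk p.2).getD "parents" []).contains nodo_X)).map Prod.fst)
      = (red.filter (fun p => ((PySem.Dict.mk p.2).getD "parents" []).contains nodo_X)).flatMap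
          (fun p => (PySem.Dict.mk p.2).getD "parents" []) := by
    rw [List.flatMap_map]
    exact List.flatMap_congr (fun p hp => by
      have hpm : p ∈ red := (List.mem_filter.mp hp).1
      rw [pv_getD_mk_of_mem red p [] hpm hnd])
  rw [hflat, pv_update_update]
  exact pv_cleanup _ nodo_X

theorem encontrar_manto_markov_spec : Claim_equal_encontrar_manto_markov := by
  intro red nodo_X _ hPre
  exact pv_main red nodo_X hPre.1
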